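-- pv_equiv track=rewrite | github.com/aws-samples/sample-bedrock-migration-and-modernization-tools | bedrock-model-profiler/ui/model_details_modal.py | group_pricing_by_dimension
-- ===== SOURCE A (Python) =====
-- from typing import Dict, Any, List
--
-- def group_pricing_by_dimension(pricing_items: List[Dict[str, Any]]) -> Dict[str, List[Dict[str, Any]]]:
--     """Group pricing items by their dimension names within a region"""
--     dimension_groups = {}
--
--     for item in pricing_items:
--         # Get the dimension name from the item
--         dimension_name = item.get('dimension_name', 'Standard')
--
--         # Initialize the group if it doesn't exist
--         if dimension_name not in dimension_groups:
--             dimension_groups[dimension_name] = []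
--
--         # Add the item to the appropriate dimension group
--         dimension_groups[dimension_name].append(item)
--
--     # Sort dimensions for consistent display (On-Demand first, then alphabetically)
--     def sort_dimensions(dim_name):
--         if 'on-demand' in dim_name.lower() and 'long context' not in dim_name.lower():
--             return (0, dim_name)  # On-Demand first
--         elif 'on-demand' in dim_name.lower() and 'long context' in dim_name.lower():
--             return (1, dim_name)  # On-Demand Long Context second
--         elif 'batch' in dim_name.lower():
--             return (2, dim_name)  # Batch third
--         else:
--             return (3, dim_name)  # Everything else alphabetically
--
--     sorted_dimension_names = sorted(dimension_groups.keys(), key=sort_dimensions)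
--     return {dim_name: dimension_groups[dim_name] for dim_name in sorted_dimension_names}
-- ===== SOURCE B (Python) =====
-- def group_pricing_by_dimension(pricing_items):
--     """Group pricing items by dimension: distinct dimensions in custom sorted order, each paired with the sub-list of its items."""
--     def sort_dimensions(dim_name):
--         low = dim_name.lower()
--         if 'on-demand' in low and 'long context' not in low:
--             return (0, dim_name)
--         elif 'on-demand' in low and 'long context' in low:
--             return (1, dim_name)
--         elif 'batch' in low:
--             return (2, dim_name)
--         else:
--             return (3, dim_name)
--
--     dims = [item.get('dimension_name', 'Standard') for item in pricing_items]
--     names = sorted(dict.fromkeys(dims), key=sort_dimensions)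
--     return {n: [item for item, d in zip(pricing_items, dims) if d == n] for n in names}
-- ===== Notes on version B (the rewrite author's own statement) =====
-- stated objective: alternative
-- what changed: B no longer builds the groups incrementally in a dict: it computes the list of dimension names, sorts their first-occurrence dedup with the same key, and then builds each group by one filtering comprehension over the zipped input per sorted name.
import Mathlib
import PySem

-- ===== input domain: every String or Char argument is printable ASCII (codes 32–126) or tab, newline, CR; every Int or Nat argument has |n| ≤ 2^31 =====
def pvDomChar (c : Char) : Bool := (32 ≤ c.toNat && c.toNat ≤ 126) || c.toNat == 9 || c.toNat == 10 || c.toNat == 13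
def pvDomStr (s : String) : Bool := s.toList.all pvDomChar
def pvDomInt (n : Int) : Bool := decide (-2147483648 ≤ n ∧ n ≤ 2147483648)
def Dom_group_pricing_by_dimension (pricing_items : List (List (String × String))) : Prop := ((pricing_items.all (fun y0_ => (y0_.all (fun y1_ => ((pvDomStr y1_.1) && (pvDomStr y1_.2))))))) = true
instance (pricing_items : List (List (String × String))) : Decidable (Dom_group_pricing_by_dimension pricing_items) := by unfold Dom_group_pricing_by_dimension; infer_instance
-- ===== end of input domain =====

-- B replaces A's incremental dict-of-lists grouping by: sorted dedup of the dimension names, then one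
-- filtering pass per name (objective: alternative decomposition, not faster).

-- item.get('dimension_name', 'Standard') — shared text of both Pythons
def pvDim (it : List (String × String)) : String :=
  PySem.Dict.getD (PySem.Dict.mk it) "dimension_name" "Standard"

-- sort_dimensions(dim_name) = (rank, dim_name); both Pythons contain this same key function
def pvRank (n : String) : Int :=
  let lo := PySem.Str.lower n
  if PySem.Str.isIn "on-demand" lo && !(PySem.Str.isIn "long context" lo) then 0
  else if PySem.Str.isIn "on-demand" lo && PySem.Str.isIn "long context" lo then 1
  else if PySem.Str.isIn "batch" lo then 2
  else 3

-- ===== PORT A =====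
-- the 'if name not in groups: groups[name] = []; groups[name].append(item)' body is exactly
-- Dict.modify name [] (· ++ [item]); groups[n] in the final comprehension is getD (every n is a key)
def group_pricing_by_dimension (pricing_items : List (List (String × String))) : List (String × List (List (String × String))) :=
  let groups : PySem.Dict String (List (List (String × String))) :=
    pricing_items.foldl (fun g it => g.modify (pvDim it) [] (· ++ [it])) PySem.Dict.empty
  let sorted_dimension_names :=
    PySem.List.sorted2 (PySem.Dict.keys groups) (fun n => pvRank n) (fun n => n) false
  sorted_dimension_names.map (fun n => (n, PySem.Dict.getD groups n []))

-- ===== PORT B =====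
def group_pricing_by_dimension_alt (pricing_items : List (List (String × String))) : List (String × List (List (String × String))) :=
  let dims := pricing_items.map (fun it => pvDim it)
  let names := PySem.List.sorted2 (PySem.List.dedup dims) (fun n => pvRank n) (fun n => n) false
  names.map (fun n => (n, ((pricing_items.zip dims).filter (fun p => p.2 == n)).map (fun p => p.1)))

-- ===== PRECONDITION & SPEC =====
def Spec_group_pricing_by_dimension (pricing_items : List (List (String × String))) (out : List (String × List (List (String × String)))) : Prop := out = group_pricing_by_dimension_alt pricing_items
instance (pricing_items : List (List (String × String))) (out : List (String × List (List (String × String)))) : Decidable (Spec_group_pricing_by_dimension pricing_items out) := by unfold Spec_group_pricing_by_dimension; infer_instance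

-- ===== CLAIM (what is proved, stated in full; the proofs are below) =====
def Claim_equal_group_pricing_by_dimension : Prop := ∀ (pricing_items : List (List (String × String))), Dom_group_pricing_by_dimension pricing_items → Spec_group_pricing_by_dimension pricing_items (group_pricing_by_dimension pricing_items)

-- ===== LEMMAS AND PROOFS =====

-- A's grouping fold over the items is the pair fold over (dim it, it)
theorem pv_fold_eq (pricing_items : List (List (String × String))) :
    pricing_items.foldl (fun g it => PySem.Dict.modify g (pvDim it) [] (· ++ [it])) PySem.Dict.empty
      = (pricing_items.map (fun it => (pvDim it, it))).foldl
          (fun g p => PySem.Dict.modify g p.1 [] (· ++ [p.2])) PySem.Dict.empty := by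
  rw [List.foldl_map]

theorem pv_keys_eq (pricing_items : List (List (String × String))) :
    PySem.Dict.keys
      (pricing_items.foldl (fun g it => PySem.Dict.modify g (pvDim it) [] (· ++ [it])) PySem.Dict.empty)
      = PySem.List.dedup (pricing_items.map (fun it => pvDim it)) := by
  rw [PySem.Dict.keys_foldl_modify_key]
  simp [PySem.Dict.keys_empty, PySem.Set.update, PySem.List.dedup_eq_ofList, PySem.Set.ofList_eq_foldl]

theorem pv_getD_eq (pricing_items : List (List (String × String))) (n : String) :
    PySem.Dict.getD
      (pricing_items.foldl (fun g it => PySem.Dict.modify g (pvDim it) [] (· ++ [it])) PySem.Dict.empty) n []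
      = ((pricing_items.zip (pricing_items.map (fun it => pvDim it))).filter
          (fun p => p.2 == n)).map (fun p => p.1) := by
  rw [pv_fold_eq, PySem.Dict.getD_foldl_modify_append]
  have hz : pricing_items.zip (pricing_items.map (fun it => pvDim it))
      = pricing_items.map (fun it => (it, pvDim it)) := by
    simpa using (List.zip_map' (f := fun it => it) (g := fun it => pvDim it) (l := pricing_items))
  rw [hz]
  simp [PySem.Dict.getD_empty, List.filter_map, List.map_map, Function.comp_def]

-- ===== VERDICT (by name: the statement is the Claim_ definition above) =====
theorem group_pricing_by_dimension_spec : Claim_equal_group_pricing_by_dimension := by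
  intro pricing_items _
  unfold Spec_group_pricing_by_dimension group_pricing_by_dimension group_pricing_by_dimension_alt
  simp only [pv_keys_eq]
  refine List.map_congr_left ?_
  intro n _
  rw [pv_getD_eq]
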